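-- pv_equiv track=rewrite | github.com/charlesyifanli/algorithm | lanqiaocup/competition/2023/3159 Filled/demo.py | f
-- ===== SOURCE A (Python) =====
-- def f(s: str) -> int:
--     cnt = 0
--     i = 0
--     while i < len(s) - 1:
--         curr = s[i]
--         late = s[i + 1]
--         if '?' in [curr, late]:
--             cnt += 1
--             i += 2
--         elif curr == late and (curr == '0' or '1'):
--             cnt += 1
--             i += 2
--         else:
--             i += 1
--     return cnt
-- ===== SOURCE B (Python) =====
-- def f(s: str) -> int:
--     # Run-length decomposition: split s into maximal segments in which every
--     # adjacent pair matches (equal, or either char is '?'); each segment of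
--     # length L contributes L // 2 pairs.
--     total = 0
--     run = 1 if s else 0
--     for a, b in zip(s, s[1:]):
--         if a == b or '?' in (a, b):
--             run += 1
--         else:
--             total += run // 2
--             run = 1
--     return total + run // 2
-- ===== Notes on version B (the rewrite author's own statement) =====
-- stated objective: alternative
-- what changed: Replaces A's greedy index walk with variable step (i += 1 or 2) by a run-length decomposition: one zip pass over adjacent character pairs splits the string into maximal segments in which every adjacent pair matches (equal or containing '?'), and each segment of length L contributes L // 2 pairs in closed form.
import Mathlib
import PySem

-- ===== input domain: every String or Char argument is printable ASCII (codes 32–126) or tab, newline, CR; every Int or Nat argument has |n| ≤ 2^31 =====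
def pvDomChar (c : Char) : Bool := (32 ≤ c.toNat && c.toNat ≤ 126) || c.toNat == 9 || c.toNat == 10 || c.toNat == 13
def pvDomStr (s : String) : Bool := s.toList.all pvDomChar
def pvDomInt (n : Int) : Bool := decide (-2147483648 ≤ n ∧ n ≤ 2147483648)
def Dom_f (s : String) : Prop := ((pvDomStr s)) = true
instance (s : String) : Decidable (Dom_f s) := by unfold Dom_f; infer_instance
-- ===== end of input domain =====

-- B replaces A's greedy index walk (variable step 1 or 2) by a run-length
-- decomposition: maximal segments of pairwise-matching adjacent chars, each
-- contributing len // 2 pairs (objective: alternative algorithm, same cost).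

-- ===== PORT A =====
-- A's while loop over index i (step 1 or 2); `curr == late and (curr == '0' or '1')`
-- is ported literally — `'1'` is a truthy string, so the conjunct is `curr = '0' ∨ True`.
def fLoop (l : List Char) : Nat → Nat → Int → Int
  | 0, _, cnt => cnt
  | fuel + 1, i, cnt =>
    if i + 1 ≤ l.length - 1 then
      match PySem.List.pyGet? l (i : Int), PySem.List.pyGet? l ((i : Int) + 1) with
      | some curr, some late =>
        if curr = '?' ∨ late = '?' then fLoop l fuel (i + 2) (cnt + 1)
        else if curr = late ∧ (curr = '0' ∨ True) then fLoop l fuel (i + 2) (cnt + 1)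
        else fLoop l fuel (i + 1) cnt
      | _, _ => cnt  -- unreachable: the loop guard puts both indices in range
    else cnt

def f (s : String) : Int := fLoop s.toList s.toList.length 0 0

-- ===== PORT B =====
-- Source B's single zip pass over adjacent pairs, carrying (total, run).
def f_alt (s : String) : Int :=
  let l := s.toList
  let p :=
    (l.zip l.tail).foldl
      (fun (st : Int × Int) ab =>
        if ab.1 = ab.2 ∨ ab.1 = '?' ∨ ab.2 = '?' then (st.1, st.2 + 1)
        else (st.1 + PySem.Int.floordiv st.2 2, 1))
      (0, if l = [] then 0 else 1)
  p.1 + PySem.Int.floordiv p.2 2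

-- ===== PRECONDITION & SPEC =====
def Spec_f (s : String) (out : Int) : Prop := out = f_alt s
instance (s : String) (out : Int) : Decidable (Spec_f s out) := by unfold Spec_f; infer_instance

-- ===== CLAIM (what is proved, stated in full; the proofs are below) =====
def Claim_equal_f : Prop := ∀ (s : String), Dom_f s → Spec_f s (f s)

-- ===== LEMMAS AND PROOFS =====

-- canonical structural form of the greedy pairing count
def gA : List Char → Int
  | c1 :: c2 :: rest =>
    if c1 = '?' ∨ c2 = '?' ∨ c1 = c2 then 1 + gA rest else gA (c2 :: rest)
  | _ => 0

lemma gA_pair (c1 c2 : Char) (rest : List Char) :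
    gA (c1 :: c2 :: rest) = if c1 = '?' ∨ c2 = '?' ∨ c1 = c2 then 1 + gA rest else gA (c2 :: rest) := rfl

lemma fLoop_eq_gA_aux (l : List Char) :
    ∀ (k i : Nat) (cnt : Int), l.length ≤ i + k → fLoop l k i cnt = cnt + gA (l.drop i) := by
  intro k
  induction k with
  | zero =>
    intro i cnt h
    rw [fLoop, List.drop_eq_nil_of_le (by omega)]
    simp [gA]
  | succ k ih =>
    intro i cnt h
    rw [fLoop]
    by_cases hlt : i + 1 ≤ l.length - 1
    · have h1 : i < l.length := by omega
      have h2 : i + 1 < l.length := by omega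
      have e2 : ((i : Int) + 1) = ((i + 1 : Nat) : Int) := by push_cast; ring
      rw [if_pos hlt, PySem.List.pyGet?_natCast, e2, PySem.List.pyGet?_natCast,
        List.getElem?_eq_getElem h1, List.getElem?_eq_getElem h2]
      have hdrop : l.drop i = l[i] :: l[i + 1] :: l.drop (i + 2) := by
        rw [List.drop_eq_getElem_cons h1, List.drop_eq_getElem_cons h2]
      dsimp only
      split_ifs with hq heq
      · rw [ih (i + 2) (cnt + 1) (by omega), hdrop, gA_pair, if_pos]
        · ring
        · rcases hq with h' | h'
          · exact Or.inl h'
          · exact Or.inr (Or.inl h')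
      · rw [ih (i + 2) (cnt + 1) (by omega), hdrop, gA_pair, if_pos (Or.inr (Or.inr heq.1))]
        ring
      · have hneg : ¬(l[i] = '?' ∨ l[i + 1] = '?' ∨ l[i] = l[i + 1]) := by
          push Not at hq
          intro hc
          rcases hc with h' | h' | h'
          · exact hq.1 h'
          · exact hq.2 h'
          · exact heq ⟨h', Or.inr trivial⟩
        rw [ih (i + 1) cnt (by omega), hdrop, gA_pair, if_neg hneg,
          List.drop_eq_getElem_cons h2]
    · rw [if_neg hlt]
      rcases Nat.lt_or_ge i l.length with hi | hi
      · rw [List.drop_eq_getElem_cons hi, List.drop_eq_nil_of_le (by omega)]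
        simp [gA]
      · rw [List.drop_eq_nil_of_le hi]; simp [gA]

lemma fLoop_eq_gA (l : List Char) (i : Nat) (cnt : Int) :
    fLoop l l.length i cnt = cnt + gA (l.drop i) :=
  fLoop_eq_gA_aux l l.length i cnt (by omega)

-- recursive reading of B's fold: previous char p, current run length r (≥ 1, ends at p)
def bRec (t r : Int) (p : Char) : List Char → Int
  | [] => t + PySem.Int.floordiv r 2
  | c :: rest =>
    if p = c ∨ p = '?' ∨ c = '?' then bRec t (r + 1) c rest
    else bRec (t + PySem.Int.floordiv r 2) 1 c rest

lemma foldl_eq_bRec (l : List Char) : ∀ (p : Char) (t r : Int),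
    (((p :: l).zip l).foldl
      (fun (st : Int × Int) ab =>
        if ab.1 = ab.2 ∨ ab.1 = '?' ∨ ab.2 = '?' then (st.1, st.2 + 1)
        else (st.1 + PySem.Int.floordiv st.2 2, 1)) (t, r)).1
      + PySem.Int.floordiv ((((p :: l).zip l).foldl
      (fun (st : Int × Int) ab =>
        if ab.1 = ab.2 ∨ ab.1 = '?' ∨ ab.2 = '?' then (st.1, st.2 + 1)
        else (st.1 + PySem.Int.floordiv st.2 2, 1)) (t, r)).2) 2
      = bRec t r p l := by
  induction l with
  | nil => intro p t r; simp [bRec]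
  | cons c rest ih =>
    intro p t r
    simp only [List.zip_cons_cons, List.foldl_cons]
    by_cases hm : p = c ∨ p = '?' ∨ c = '?'
    · simpa [bRec, hm] using ih c t (r + 1)
    · simpa [bRec, hm] using ih c (t + PySem.Int.floordiv r 2) 1

-- the run-length invariant: r ≥ 1 chars of the current run end at p;
-- if r is odd, p is still unpaired by the greedy, otherwise it is consumed.
lemma bRec_eq_gA (l : List Char) : ∀ (t r : Int) (p : Char), 1 ≤ r →
    bRec t r p l = t + PySem.Int.floordiv r 2
      + (if r % 2 = 1 then gA (p :: l) else gA l) := by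
  induction l with
  | nil =>
    intro t r p _
    rcases Int.emod_two_eq_zero_or_one r with h | h <;> simp [bRec, gA, h]
  | cons c rest ih =>
    intro t r p hr
    rw [bRec]
    have hfd : ∀ x : Int, 0 < x → PySem.Int.floordiv x 2 = x / 2 := fun x _ =>
      PySem.Int.floordiv_eq_ediv_of_pos (by omega)
    by_cases hm : p = c ∨ p = '?' ∨ c = '?'
    · rw [if_pos hm, ih t (r + 1) c (by omega)]
      have hg : gA (p :: c :: rest) = 1 + gA rest := by
        rw [gA_pair, if_pos]
        rcases hm with h | h | h
        · exact Or.inr (Or.inr h)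
        · exact Or.inl h
        · exact Or.inr (Or.inl h)
      rcases Int.emod_two_eq_zero_or_one r with h | h
      · have h1 : (r + 1) % 2 = 1 := by omega
        rw [hfd r (by omega), hfd (r + 1) (by omega)]
        simp only [h, h1]
        have : (r + 1) / 2 = r / 2 := by omega
        simp [this]
      · have h1 : (r + 1) % 2 = 0 := by omega
        rw [hfd r (by omega), hfd (r + 1) (by omega)]
        simp only [h, h1]
        have : (r + 1) / 2 = r / 2 + 1 := by omega
        rw [this, hg]
        norm_num
        ring
    · rw [if_neg hm, ih (t + PySem.Int.floordiv r 2) 1 c (by omega)]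
      have hg : gA (p :: c :: rest) = gA (c :: rest) := by
        rw [gA_pair, if_neg]
        push Not at hm
        intro hc
        rcases hc with h | h | h
        · exact hm.2.1 h
        · exact hm.2.2 h
        · exact hm.1 h
      rcases Int.emod_two_eq_zero_or_one r with h | h <;>
        simp [h, hg, PySem.Int.floordiv]

-- ===== VERDICT (by name: the statement is the Claim_ definition above) =====
theorem f_spec : Claim_equal_f := by
  intro s _
  unfold Spec_f f f_alt
  rw [fLoop_eq_gA]
  cases hl : s.toList with
  | nil => simp [gA]
  | cons c rest =>
    simp only [List.drop_zero, List.tail_cons, reduceCtorEq, if_false]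
    rw [foldl_eq_bRec rest c 0 1, bRec_eq_gA rest 0 1 c (by omega)]
    norm_num [PySem.Int.floordiv]
    decide
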